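-- pv_equiv track=rewrite | github.com/SamHames/hyperreal | hyperreal/utilities.py | long_distance_bigrams
-- ===== SOURCE A (Python) =====
-- def long_distance_bigrams(items, max_window_size, include_items=None):
--     """
--     Return the set of pairs of items from the stream that occur within
--     `max_window_size` of each other.
--
--     The returned value is a set of (item_a, item_b, offset) triples,
--     representing the items and the ordinal distance between them in the
--     stream.
--
--     The stream can be a sequence of any type of items, except None, which is
--     used as a sentinel to indicate boundaries that the window should not
--     cross. For example:
--
--     >>> sorted(
--     ...     long_distance_bigrams(
--     ...         ['a', 'b', 'c', None, 'd', 'e'],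
--     ...         2
--     ...     )
--     ... )
--     [('a', 'b', 1), ('a', 'c', 2), ('b', 'c', 1), ('d', 'e', 1)]
--
--     `include_items` is a set of items to consider - if provided values
--     not in this set will not be generated as pairs. This is primarily
--     useful to prefilter items and limit the size of the set returned.
--
--     >>> sorted(
--     ...     long_distance_bigrams(
--     ...         ['a', 'b', 'c', None, 'd', 'e'],
--     ...         2,
--     ...         include_items={'a', 'b', 'd', 'e'}
--     ...     )
--     ... )
--     [('a', 'b', 1), ('d', 'e', 1)]
--
--     """
--
--     bigrams = set()
--
--     if include_items is not None:
--         position_stream = [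
--             (i, item)
--             for i, item in enumerate(items)
--             if (item is None or item in include_items)
--         ]
--     else:
--         position_stream = list(enumerate(items))
--
--     for i, (position_a, item_a) in enumerate(position_stream):
--         if item_a is None:
--             continue
--
--         for position_b, item_b in position_stream[i + 1 : i + 1 + max_window_size]:
--             gap = position_b - position_a
--
--             if item_b is None or (gap > max_window_size):
--                 break
--
--             bigrams.add((item_a, item_b, gap))
--
--     return bigrams
-- ===== SOURCE B (Python) =====
-- def long_distance_bigrams(items, max_window_size, include_items=None):
--     if include_items is not None:
--         stream = [
--             (i, item)
--             for i, item in enumerate(items)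
--             if (item is None or item in include_items)
--         ]
--     else:
--         stream = list(enumerate(items))
--
--     # One pass to cut the stream into None-free segments, so pair
--     # generation never needs the None-boundary break logic.
--     segments = []
--     current = []
--     for position, item in stream:
--         if item is None:
--             if current:
--                 segments.append(current)
--             current = []
--         else:
--             current.append((position, item))
--     if current:
--         segments.append(current)
--
--     w = max(max_window_size, 0)
--     return {
--         (item_a, item_b, position_b - position_a)
--         for segment in segments
--         for j, (position_a, item_a) in enumerate(segment)
--         for position_b, item_b in segment[j + 1 : j + 1 + w]
--         if position_b - position_a <= max_window_size
--     }
-- ===== Notes on version B (the rewrite author's own statement) =====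
-- stated objective: alternative
-- what changed: A re-slices the mixed None-bearing position stream for every item and relies on break-on-None/break-on-gap inside the pair loop; B first cuts the stream into None-free segments in one pass and then emits pairs with a flat filtered window comprehension per segment, with no break logic and no set mutation.
import Mathlib
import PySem

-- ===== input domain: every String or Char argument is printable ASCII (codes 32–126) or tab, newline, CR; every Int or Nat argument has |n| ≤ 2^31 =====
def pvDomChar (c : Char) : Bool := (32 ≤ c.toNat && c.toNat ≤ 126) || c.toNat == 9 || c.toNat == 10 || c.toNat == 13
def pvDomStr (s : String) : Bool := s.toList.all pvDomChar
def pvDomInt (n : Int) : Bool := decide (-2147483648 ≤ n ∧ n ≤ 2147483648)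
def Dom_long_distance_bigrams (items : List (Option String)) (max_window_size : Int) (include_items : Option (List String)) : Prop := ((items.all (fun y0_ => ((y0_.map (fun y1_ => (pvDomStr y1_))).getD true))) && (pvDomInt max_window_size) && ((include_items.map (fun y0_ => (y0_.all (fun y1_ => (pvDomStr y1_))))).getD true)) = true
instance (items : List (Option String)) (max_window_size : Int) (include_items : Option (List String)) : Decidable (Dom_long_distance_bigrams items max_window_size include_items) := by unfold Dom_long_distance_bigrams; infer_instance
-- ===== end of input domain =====

-- B replaces A's per-item re-slicing of the mixed stream (with None/window break logic inside
-- the pair loop) by a one-pass split into None-free segments followed by a flat filtered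
-- comprehension over each segment; same returned set, proved equal element-list for element-list.

-- ===== PORT A =====
-- position_stream construction (enumerate + include_items filter, Nones kept)
def pvStreamA (items : List (Option String)) (include_items : Option (List String)) : List (Int × Option String) :=
  match include_items with
  | some incl =>
      (PySem.List.enumerate items).filter
        (fun p => match p.2 with | none => true | some it => incl.contains it)
  | none => PySem.List.enumerate items

-- the inner `for … in position_stream[i+1 : i+1+max_window_size]` loop with its break
def pvInnerA (mws pa : Int) (a : String) :
    List (Int × Option String) → PySem.Set (String × String × Int) → PySem.Set (String × String × Int)
  | [], s => s
  | (pb, ob) :: rest, s =>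
      match ob with
      | none => s
      | some b =>
          if pb - pa > mws then s
          else pvInnerA mws pa a rest (PySem.Set.add s (a, b, pb - pa))

def long_distance_bigrams (items : List (Option String)) (max_window_size : Int) (include_items : Option (List String)) : List (String × String × Int) :=
  let ps := pvStreamA items include_items
  (PySem.List.enumerate ps).foldl
    (fun s ip =>
      match ip.2.2 with
      | none => s
      | some a =>
          pvInnerA max_window_size ip.2.1 a
            (PySem.List.slice ps (some (ip.1 + 1)) (some (ip.1 + 1 + max_window_size))) s)
    PySem.Set.empty

-- ===== PORT B =====
def pvStreamB (items : List (Option String)) (include_items : Option (List String)) : List (Int × Option String) :=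
  match include_items with
  | some incl =>
      (PySem.List.enumerate items).filter
        (fun p => match p.2 with | none => true | some it => incl.contains it)
  | none => PySem.List.enumerate items

-- one pass cutting the stream into None-free segments
def pvSegLoop (segs : List (List (Int × String))) (cur : List (Int × String)) :
    List (Int × Option String) → List (List (Int × String))
  | [] => if cur.isEmpty then segs else segs ++ [cur]
  | (p, ob) :: rest =>
      match ob with
      | none => pvSegLoop (if cur.isEmpty then segs else segs ++ [cur]) [] rest
      | some it => pvSegLoop segs (cur ++ [(p, it)]) rest

def long_distance_bigrams_alt (items : List (Option String)) (max_window_size : Int) (include_items : Option (List String)) : List (String × String × Int) :=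
  let stream := pvStreamB items include_items
  let segments := pvSegLoop [] [] stream
  let w := max max_window_size 0
  PySem.Set.ofList
    (segments.flatMap (fun seg =>
      (PySem.List.enumerate seg).flatMap (fun jp =>
        ((PySem.List.slice seg (some (jp.1 + 1)) (some (jp.1 + 1 + w))).filter
            (fun q => decide (q.1 - jp.2.1 ≤ max_window_size))).map
          (fun q => (jp.2.2, q.2, q.1 - jp.2.1)))))

-- ===== PRECONDITION & SPEC =====
def Spec_long_distance_bigrams (items : List (Option String)) (max_window_size : Int) (include_items : Option (List String)) (out : List (String × String × Int)) : Prop := out = long_distance_bigrams_alt items max_window_size include_items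
instance (items : List (Option String)) (max_window_size : Int) (include_items : Option (List String)) (out : List (String × String × Int)) : Decidable (Spec_long_distance_bigrams items max_window_size include_items out) := by unfold Spec_long_distance_bigrams; infer_instance

-- ===== CLAIM (what is proved, stated in full; the proofs are below) =====
def Claim_equal_long_distance_bigrams : Prop := ∀ (items : List (Option String)) (max_window_size : Int) (include_items : Option (List String)), Dom_long_distance_bigrams items max_window_size include_items → Spec_long_distance_bigrams items max_window_size include_items (long_distance_bigrams items max_window_size include_items)

-- ===== LEMMAS AND PROOFS =====

-- proof-side normal forms
def pvHd (mws pa : Int) (a : String) (tl : List (Int × String)) : List (String × String × Int) :=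
  ((tl.take mws.toNat).filter (fun q => decide (q.1 - pa ≤ mws))).map (fun q => (a, q.2, q.1 - pa))

def pvSegHead (l : List (Int × Option String)) : List (Int × String) :=
  (l.takeWhile (fun q => q.2.isSome)).map (fun q => (q.1, q.2.getD ""))

def pvSP (mws : Int) : List (Int × String) → List (String × String × Int)
  | [] => []
  | (pa, a) :: rest => pvHd mws pa a rest ++ pvSP mws rest

def pvM (mws : Int) : List (Int × Option String) → List (String × String × Int)
  | [] => []
  | (_, none) :: r => pvM mws r
  | (p, some a) :: r => pvHd mws p a (pvSegHead r) ++ pvM mws r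

def pvF (mws : Int) : List (Int × String) → List (Int × String) → List (String × String × Int)
  | [], _ => []
  | (pa, a) :: c, s => pvHd mws pa a (c ++ s) ++ pvF mws c s

def pvInnerL (mws pa : Int) (a : String) (xs : List (Int × Option String)) : List (String × String × Int) :=
  (xs.takeWhile (fun q => q.2.isSome && decide (q.1 - pa ≤ mws))).map (fun q => (a, q.2.getD "", q.1 - pa))

def pvGA (mws : Int) (ps : List (Int × Option String)) (ip : Int × (Int × Option String)) : List (String × String × Int) :=
  match ip.2.2 with
  | none => []
  | some a => pvInnerL mws ip.2.1 a (PySem.List.slice ps (some (ip.1 + 1)) (some (ip.1 + 1 + mws)))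

def pvGB (mws : Int) (seg : List (Int × String)) (jp : Int × (Int × String)) : List (String × String × Int) :=
  ((PySem.List.slice seg (some (jp.1 + 1)) (some (jp.1 + 1 + max mws 0))).filter
      (fun q => decide (q.1 - jp.2.1 ≤ mws))).map
    (fun q => (jp.2.2, q.2, q.1 - jp.2.1))

-- generic glue lemmas
lemma pv_foldl_add_flatMap {ι : Type} (l : List ι) (g : ι → List (String × String × Int))
    (s : PySem.Set (String × String × Int)) :
    (l.flatMap g).foldl PySem.Set.add s = l.foldl (fun s ip => (g ip).foldl PySem.Set.add s) s := by
  induction l generalizing s with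
  | nil => rfl
  | cons x xs ih => simp [List.flatMap_cons, List.foldl_append, ih]

lemma pv_takeWhile_take {α : Type} (p : α → Bool) : ∀ (xs : List α) (n : Nat),
    (xs.take n).takeWhile p = (xs.takeWhile p).take n := by
  intro xs
  induction xs with
  | nil => intro n; simp
  | cons x xs ih =>
      intro n
      cases n with
      | zero => simp
      | succ n =>
          by_cases h : p x
          · simp [h, ih]
          · simp [h]

lemma pv_filter_eq_takeWhile {α : Type} (p : α → Bool) (key : α → Int) :
    ∀ (xs : List α), xs.Pairwise (fun u v => key u < key v) →
    (∀ u v, key u < key v → p u = false → p v = false) →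
    xs.filter p = xs.takeWhile p := by
  intro xs
  induction xs with
  | nil => simp
  | cons x xs ih =>
      intro hp hmono
      rcases List.pairwise_cons.mp hp with ⟨hx, hxs⟩
      cases hpx : p x with
      | true =>
          simp only [List.filter_cons, List.takeWhile_cons, hpx, if_pos]
          rw [ih hxs hmono]
      | false =>
          have hnil : xs.filter p = [] := by
            rw [List.filter_eq_nil_iff]
            intro q hq
            simp [hmono x q (hx q hq) hpx]
          simp only [List.filter_cons, List.takeWhile_cons, hpx]
          simp [hnil]

lemma pv_tw_split (pa mws : Int) : ∀ (r : List (Int × Option String)),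
    r.takeWhile (fun q => q.2.isSome && decide (q.1 - pa ≤ mws)) =
      ((pvSegHead r).takeWhile (fun q => decide (q.1 - pa ≤ mws))).map (fun q => (q.1, some q.2)) := by
  intro r
  induction r with
  | nil => simp [pvSegHead]
  | cons x r ih =>
      rcases x with ⟨px, ox⟩
      cases ox with
      | none => simp [pvSegHead]
      | some b =>
          by_cases h : px - pa ≤ mws
          · have h2 : px ≤ mws + pa := by omega
            simp [pvSegHead, h2] at ih ⊢
            exact ih
          · have h2 : ¬ px ≤ mws + pa := by omega
            simp [pvSegHead, h2]

lemma pv_slice_drop_take {α : Type} (xs : List α) (j : Nat) (z : Int) :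
    ∃ m : Nat, PySem.List.slice xs (some (j : Int)) (some z) = (xs.drop j).take m := by
  unfold PySem.List.slice
  by_cases hle : j ≤ xs.length
  · refine ⟨PySem.List.clampIdx xs.length z - j, ?_⟩
    have hj : ¬ ((j : Int) < 0) := by omega
    simp [PySem.List.clampIdx, hj, Nat.min_eq_left hle]
  · refine ⟨0, ?_⟩
    have hj : ¬ ((j : Int) < 0) := by omega
    have h2 : xs.drop j = [] := List.drop_eq_nil_of_le (by omega)
    simp [PySem.List.clampIdx, hj, Nat.min_eq_right (by omega : xs.length ≤ j), h2]

-- per-element equality: A's inner loop over its slice equals B's windowed filter over the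
-- remainder of the current segment
lemma pv_inner_slice_eq (mws : Int) (ps rest' : List (Int × Option String)) (k : Nat) (p : Int) (a : String)
    (hdrop : ps.drop (k + 1) = rest')
    (hrest : rest'.Pairwise (fun u v => u.1 < v.1))
    (hhd : ∀ q ∈ rest', p < q.1) :
    pvInnerL mws p a (PySem.List.slice ps (some ((k : Int) + 1)) (some ((k : Int) + 1 + mws))) =
      pvHd mws p a (pvSegHead rest') := by
  have hseg : (pvSegHead rest').Pairwise (fun u v => u.1 < v.1) := by
    unfold pvSegHead
    rw [List.pairwise_map]
    exact (hrest.sublist (List.takeWhile_sublist _))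
  have hmono : ∀ u v : Int × String, u.1 < v.1 →
      (fun q : Int × String => decide (q.1 - p ≤ mws)) u = false →
      (fun q : Int × String => decide (q.1 - p ≤ mws)) v = false := by
    intro u v huv hu
    simp only [decide_eq_false_iff_not] at hu ⊢
    omega
  by_cases hm : 0 ≤ mws
  · have hcast1 : ((k : Int) + 1) = ((k + 1 : Nat) : Int) := by push_cast; ring
    have hcast2 : (((k + 1 : Nat) : Int) + mws) = (((k + 1 : Nat) : Int) + ((mws.toNat : Nat) : Int)) := by
      rw [Int.toNat_of_nonneg hm]
    rw [hcast1, hcast2, PySem.List.slice_natCast_add, hdrop]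
    unfold pvInnerL pvHd
    rw [pv_takeWhile_take, pv_tw_split p mws rest']
    rw [pv_filter_eq_takeWhile _ (fun q => q.1)
          ((pvSegHead rest').take mws.toNat)
          (hseg.sublist (List.take_sublist _ _)) hmono,
        pv_takeWhile_take, ← List.map_take, List.map_map]
    rfl
  · have hm' : mws < 0 := by omega
    have hW : mws.toNat = 0 := by omega
    have hHd : pvHd mws p a (pvSegHead rest') = [] := by
      unfold pvHd; rw [hW]; simp
    rw [hHd]
    have hcast1 : ((k : Int) + 1) = ((k + 1 : Nat) : Int) := by push_cast; ring
    rw [hcast1]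
    obtain ⟨m, hm2⟩ := pv_slice_drop_take ps (k + 1) (((k + 1 : Nat) : Int) + mws)
    rw [hm2, hdrop]
    unfold pvInnerL
    cases rest' with
    | nil => simp
    | cons q r2 =>
        cases m with
        | zero => simp
        | succ m' =>
            have hq : p < q.1 := hhd q (List.mem_cons_self ..)
            have hgap : ¬ (q.1 - p ≤ mws) := by omega
            simp only [List.take_succ_cons, List.takeWhile_cons]
            have hcond : (q.2.isSome && decide (q.1 - p ≤ mws)) = false := by
              simp only [Bool.and_eq_false_iff, decide_eq_false_iff_not]
              right; omega
            simp only [hcond]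
            simp

lemma pv_innerA_fold (mws pa : Int) (a : String) : ∀ (xs : List (Int × Option String)) (s : PySem.Set (String × String × Int)),
    pvInnerA mws pa a xs s = (pvInnerL mws pa a xs).foldl PySem.Set.add s := by
  intro xs
  induction xs with
  | nil => intro s; simp [pvInnerA, pvInnerL]
  | cons x xs ih =>
      intro s
      rcases x with ⟨pb, ob⟩
      cases ob with
      | none => simp [pvInnerA, pvInnerL]
      | some b =>
          by_cases h : pb - pa > mws
          · have h2 : ¬ pb ≤ mws + pa := by omega
            simp [pvInnerA, pvInnerL, h, h2]
          · have h2 : pb ≤ mws + pa := by omega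
            simp [pvInnerA, pvInnerL, h, h2, ih]

lemma pv_A_gen (mws : Int) : ∀ (rest : List (Int × Option String)) (k : Nat) (ps : List (Int × Option String)),
    ps.drop k = rest → (ps.drop k).Pairwise (fun u v => u.1 < v.1) →
    (PySem.List.enumerate rest (k : Int)).flatMap (pvGA mws ps) = pvM mws rest := by
  intro rest
  induction rest with
  | nil => intro k ps _ _; simp [pvM]
  | cons x rest' ih =>
      intro k ps hdrop hsort
      rcases x with ⟨p, oa⟩
      rw [PySem.List.enumerate_cons, List.flatMap_cons]
      have hdrop' : ps.drop (k + 1) = rest' := by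
        rw [← List.tail_drop, hdrop]; rfl
      rw [hdrop] at hsort
      rcases List.pairwise_cons.mp hsort with ⟨hhd, hrest⟩
      have hsort' : (ps.drop (k + 1)).Pairwise (fun u v => u.1 < v.1) := by
        rw [hdrop']; exact hrest
      have hk1 : (k : Int) + 1 = ((k + 1 : Nat) : Int) := by push_cast; ring
      have htail : (PySem.List.enumerate rest' ((k : Int) + 1)).flatMap (pvGA mws ps) = pvM mws rest' := by
        rw [hk1]; exact ih (k + 1) ps hdrop' hsort'
      cases oa with
      | none => simpa [pvGA, pvM] using htail
      | some a =>
          have hel : pvGA mws ps ((k : Int), (p, some a)) = pvHd mws p a (pvSegHead rest') := by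
            show pvInnerL mws p a
                (PySem.List.slice ps (some ((k : Int) + 1)) (some ((k : Int) + 1 + mws))) =
              pvHd mws p a (pvSegHead rest')
            exact pv_inner_slice_eq mws ps rest' k p a hdrop' hrest hhd
          rw [hel, htail]
          rfl

lemma pv_B_gen (mws : Int) : ∀ (rest : List (Int × String)) (k : Nat) (seg : List (Int × String)),
    seg.drop k = rest →
    (PySem.List.enumerate rest (k : Int)).flatMap (pvGB mws seg) = pvSP mws rest := by
  intro rest
  induction rest with
  | nil => intro k seg _; simp [pvSP]
  | cons x rest' ih =>
      intro k seg hdrop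
      rcases x with ⟨pa, a⟩
      rw [PySem.List.enumerate_cons, List.flatMap_cons]
      have hdrop' : seg.drop (k + 1) = rest' := by
        rw [← List.tail_drop, hdrop]; rfl
      have hk1 : (k : Int) + 1 = ((k + 1 : Nat) : Int) := by push_cast; ring
      have htail : (PySem.List.enumerate rest' ((k : Int) + 1)).flatMap (pvGB mws seg) = pvSP mws rest' := by
        rw [hk1]; exact ih (k + 1) seg hdrop'
      have hel : pvGB mws seg ((k : Int), (pa, a)) = pvHd mws pa a rest' := by
        unfold pvGB pvHd
        have hmax : max mws 0 = ((mws.toNat : Nat) : Int) := (Int.toNat_eq_max mws).symm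
        rw [show ((k : Int), (pa, a)).1 + 1 = ((k + 1 : Nat) : Int) from by push_cast; ring]
        rw [hmax, PySem.List.slice_natCast_add, hdrop']
      rw [hel, htail]
      rfl

lemma pv_F_nil (mws : Int) : ∀ (c : List (Int × String)), pvF mws c [] = pvSP mws c := by
  intro c
  induction c with
  | nil => rfl
  | cons x c ih => rcases x with ⟨pa, a⟩; simp [pvF, pvSP, ih]

lemma pv_F_snoc (mws : Int) (x : Int × String) : ∀ (c s : List (Int × String)),
    pvF mws (c ++ [x]) s = pvF mws c (x :: s) ++ pvHd mws x.1 x.2 s := by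
  intro c
  induction c with
  | nil => intro s; simp [pvF]
  | cons y c ih =>
      intro s
      rcases y with ⟨pa, a⟩
      simp only [List.cons_append, pvF, ih, List.append_assoc]
      simp

lemma pv_segLoop_flat (mws : Int) : ∀ (l : List (Int × Option String)) (segs : List (List (Int × String))) (cur : List (Int × String)),
    (pvSegLoop segs cur l).flatMap (pvSP mws) =
      segs.flatMap (pvSP mws) ++ pvF mws cur (pvSegHead l) ++ pvM mws l := by
  intro l
  induction l with
  | nil =>
      intro segs cur
      by_cases hc : cur.isEmpty
      · rw [List.isEmpty_iff] at hc
        subst hc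
        simp [pvSegLoop, pvM, pvF]
      · rw [show pvSegLoop segs cur [] = segs ++ [cur] from by simp [pvSegLoop, hc]]
        simp [pvSegHead, pvM, pv_F_nil]
  | cons x l ih =>
      intro segs cur
      rcases x with ⟨p, ob⟩
      cases ob with
      | none =>
          have hseg : pvSegHead ((p, none) :: l) = [] := by
            simp [pvSegHead]
          rw [show pvSegLoop segs cur ((p, none) :: l) =
                pvSegLoop (if cur.isEmpty then segs else segs ++ [cur]) [] l from rfl]
          rw [ih]
          by_cases hc : cur.isEmpty
          · rw [List.isEmpty_iff] at hc
            subst hc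
            simp [pvM, pvF]
          · simp only [hc, pvM]
            simp [hseg, pv_F_nil, pvF]
      | some b =>
          have hseg : pvSegHead ((p, some b) :: l) = (p, b) :: pvSegHead l := by
            simp [pvSegHead]
          rw [show pvSegLoop segs cur ((p, some b) :: l) =
                pvSegLoop segs (cur ++ [(p, b)]) l from rfl]
          rw [ih, pv_F_snoc, hseg]
          show _ = segs.flatMap (pvSP mws) ++ pvF mws cur ((p, b) :: pvSegHead l) ++
            (pvHd mws p b (pvSegHead l) ++ pvM mws l)
          simp [List.append_assoc]

-- ===== VERDICT (by name: the statement is the Claim_ definition above) =====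
lemma pv_B_top (mws : Int) (seg : List (Int × String)) :
    (PySem.List.enumerate seg).flatMap (pvGB mws seg) = pvSP mws seg := by
  simpa using pv_B_gen mws seg 0 seg rfl

theorem long_distance_bigrams_spec : Claim_equal_long_distance_bigrams := by
  intro items mws inc _
  unfold Spec_long_distance_bigrams
  show long_distance_bigrams items mws inc = long_distance_bigrams_alt items mws inc
  unfold long_distance_bigrams long_distance_bigrams_alt
  have hstream : pvStreamB items inc = pvStreamA items inc := rfl
  rw [hstream]
  set ps := pvStreamA items inc with hps
  have hsort : ps.Pairwise (fun u v => u.1 < v.1) := by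
    rw [hps]
    unfold pvStreamA
    cases inc with
    | none => exact PySem.List.pairwise_lt_enumerate items 0
    | some incl => exact (PySem.List.pairwise_lt_enumerate items 0).filter _
  have hA : (PySem.List.enumerate ps).foldl
      (fun s ip =>
        match ip.2.2 with
        | none => s
        | some a =>
            pvInnerA mws ip.2.1 a
              (PySem.List.slice ps (some (ip.1 + 1)) (some (ip.1 + 1 + mws))) s)
      PySem.Set.empty =
      PySem.Set.ofList ((PySem.List.enumerate ps).flatMap (pvGA mws ps)) := by
    rw [PySem.Set.ofList_eq_foldl, pv_foldl_add_flatMap]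
    apply List.foldl_ext
    intro s ip _
    rcases ip with ⟨i, pi, oa⟩
    cases oa with
    | none => rfl
    | some a => exact pv_innerA_fold mws pi a _ s
  rw [hA]
  have hAgen : (PySem.List.enumerate ps).flatMap (pvGA mws ps) = pvM mws ps := by
    simpa using pv_A_gen mws ps 0 ps rfl (by simpa using hsort)
  rw [hAgen]
  have hBfun : (fun seg => (PySem.List.enumerate seg).flatMap (fun jp =>
      ((PySem.List.slice seg (some (jp.1 + 1)) (some (jp.1 + 1 + max mws 0))).filter
          (fun q => decide (q.1 - jp.2.1 ≤ mws))).map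
        (fun q => (jp.2.2, q.2, q.1 - jp.2.1)))) = pvSP mws := by
    funext seg
    exact pv_B_top mws seg
  show PySem.Set.ofList (pvM mws ps) =
    PySem.Set.ofList
      ((pvSegLoop [] [] ps).flatMap (fun seg =>
        (PySem.List.enumerate seg).flatMap (fun jp =>
          ((PySem.List.slice seg (some (jp.1 + 1)) (some (jp.1 + 1 + max mws 0))).filter
              (fun q => decide (q.1 - jp.2.1 ≤ mws))).map
            (fun q => (jp.2.2, q.2, q.1 - jp.2.1)))))
  rw [hBfun, pv_segLoop_flat mws ps [] []]
  simp [pvF]
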